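-- pv_equiv track=rewrite | github.com/shaweii/programming-practices | function/option.func.py | flipped_triangle
-- ===== SOURCE A (Python) =====
-- def flipped_triangle(n):
--     x =""
--     for i in range(1,n+1):
--         for j in range(n,0,-1):
--             if(j <= i):
--                x = x + "* "
--             else:
--                x = x + "  "
--         x = x + "\n"
--     return x
-- ===== SOURCE B (Python) =====
-- def flipped_triangle(n):
--     return "".join("  " * (n - i) + "* " * i + "\n" for i in range(1, n + 1))
-- ===== Notes on version B (the rewrite author's own statement) =====
-- stated objective: idiomatic
-- what changed: Replaces the nested per-character loop with branch (j <= i) by a direct closed-form construction of each row via string repetition, assembled with a single join over the rows.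
import Mathlib
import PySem

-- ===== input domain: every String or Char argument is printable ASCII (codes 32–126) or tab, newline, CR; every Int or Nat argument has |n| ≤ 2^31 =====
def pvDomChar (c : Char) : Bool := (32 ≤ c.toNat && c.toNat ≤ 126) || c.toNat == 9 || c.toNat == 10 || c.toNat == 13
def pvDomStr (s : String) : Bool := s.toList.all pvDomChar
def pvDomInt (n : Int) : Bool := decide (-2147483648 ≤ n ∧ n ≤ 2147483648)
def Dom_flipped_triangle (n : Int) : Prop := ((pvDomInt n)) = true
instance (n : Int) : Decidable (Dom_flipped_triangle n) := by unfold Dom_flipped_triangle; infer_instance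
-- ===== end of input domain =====

-- B replaces the nested per-character loop (branching on j <= i) by closed-form rows built
-- with string repetition, joined in one pass; same return value for every Int n.

-- ===== PORT A =====
def flipped_triangle (n : Int) : String :=
  (PySem.List.pyRange 1 (n + 1) 1).foldl
    (fun x i =>
      ((PySem.List.pyRange n 0 (-1)).foldl
        (fun x j => x ++ (if j ≤ i then "* " else "  ")) x) ++ "\n")
    ""

-- ===== PORT B =====
-- Python's  s * k  on a string and an int (empty for k ≤ 0)
def pyMulStr (s : String) (k : Int) : String :=
  String.join (List.replicate k.toNat s)

def flipped_triangle_alt (n : Int) : String :=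
  String.join ((PySem.List.pyRange 1 (n + 1) 1).map
    (fun i => pyMulStr "  " (n - i) ++ pyMulStr "* " i ++ "\n"))

-- ===== PRECONDITION & SPEC =====
def Spec_flipped_triangle (n : Int) (out : String) : Prop := out = flipped_triangle_alt n
instance (n : Int) (out : String) : Decidable (Spec_flipped_triangle n out) := by unfold Spec_flipped_triangle; infer_instance

-- ===== CLAIM (what is proved, stated in full; the proofs are below) =====
def Claim_equal_flipped_triangle : Prop := ∀ (n : Int), Dom_flipped_triangle n → Spec_flipped_triangle n (flipped_triangle n)

-- ===== LEMMAS AND PROOFS =====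

theorem foldl_append_shift : ∀ (l : List String) (x : String),
    l.foldl (· ++ ·) x = x ++ l.foldl (· ++ ·) ""
  | [], x => by simp
  | a :: t, x => by
      simp only [List.foldl_cons]
      rw [foldl_append_shift t (x ++ a), foldl_append_shift t ("" ++ a)]
      simp [String.append_assoc]

theorem join_cons (a : String) (l : List String) :
    String.join (a :: l) = a ++ String.join l := by
  simp only [String.join, List.foldl_cons]
  rw [foldl_append_shift l ("" ++ a)]
  simp

theorem pyMulStr_nonpos (s : String) (k : Int) (h : k ≤ 0) : pyMulStr s k = "" := by
  have : k.toNat = 0 := by omega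
  simp [pyMulStr, this, String.join]

theorem pyMulStr_succ (s : String) (k : Int) (h : 0 < k) :
    pyMulStr s k = s ++ pyMulStr s (k - 1) := by
  have hk : k.toNat = (k - 1).toNat + 1 := by omega
  rw [pyMulStr, hk, List.replicate_succ, join_cons]
  rfl

-- the inner loop of A appends (n-i) double-spaces then (min n i) stars
theorem innerA (i : Int) (hi : 0 < i) (m : Int) (x : String) :
    (PySem.List.pyRange m 0 (-1)).foldl
      (fun x j => x ++ (if j ≤ i then "* " else "  ")) x
    = x ++ pyMulStr "  " (m - i) ++ pyMulStr "* " (min m i) := by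
  by_cases hm : m ≤ 0
  · rw [PySem.List.pyRange_neg_one_eq_nil hm]
    rw [pyMulStr_nonpos _ _ (by omega), pyMulStr_nonpos _ _ (by omega)]
    simp
  · rw [not_le] at hm
    rw [PySem.List.pyRange_neg_one_cons hm]
    simp only [List.foldl_cons]
    rw [innerA i hi (m - 1)]
    by_cases hmi : m ≤ i
    · rw [if_pos hmi]
      rw [pyMulStr_nonpos "  " (m - i) (by omega),
          pyMulStr_nonpos "  " (m - 1 - i) (by omega)]
      have h1 : min (m - 1) i = m - 1 := by omega
      have h2 : min m i = m := by omega
      rw [h1, h2, pyMulStr_succ "* " m hm]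
      simp [String.append_assoc]
    · rw [if_neg hmi]
      rw [not_le] at hmi
      have h1 : min (m - 1) i = i := by omega
      have h2 : min m i = i := by omega
      rw [h1, h2, pyMulStr_succ "  " (m - i) (by omega)]
      have : m - i - 1 = m - 1 - i := by omega
      simp [String.append_assoc, this]
termination_by m.toNat
decreasing_by omega

-- a fold that only appends g i equals the join of the mapped rows
theorem outer_fold (g : Int → String) :
    ∀ (l : List Int) (x : String),
      l.foldl (fun x i => x ++ g i) x = x ++ String.join (l.map g)
  | [], x => by simp [String.join]
  | i :: t, x => by
      simp only [List.foldl_cons, List.map_cons, join_cons]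
      rw [outer_fold g t (x ++ g i)]
      simp [String.append_assoc]

theorem row_eq (n i : Int) (h1 : 1 ≤ i) (h2 : i < n + 1) (x : String) :
    ((PySem.List.pyRange n 0 (-1)).foldl
        (fun x j => x ++ (if j ≤ i then "* " else "  ")) x) ++ "\n"
    = x ++ (pyMulStr "  " (n - i) ++ pyMulStr "* " i ++ "\n") := by
  rw [innerA i (by omega)]
  have : min n i = i := by omega
  rw [this]
  simp [String.append_assoc]

-- ===== VERDICT (by name: the statement is the Claim_ definition above) =====
theorem flipped_triangle_spec : Claim_equal_flipped_triangle := by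
  intro n _
  unfold Spec_flipped_triangle flipped_triangle flipped_triangle_alt
  have h1 : (PySem.List.pyRange 1 (n + 1) 1).foldl
      (fun x i =>
        ((PySem.List.pyRange n 0 (-1)).foldl
          (fun x j => x ++ (if j ≤ i then "* " else "  ")) x) ++ "\n") ""
    = (PySem.List.pyRange 1 (n + 1) 1).foldl
      (fun x i => x ++ (pyMulStr "  " (n - i) ++ pyMulStr "* " i ++ "\n")) "" := by
    apply PySem.List.foldl_congr_mem
    intro x i hi
    rw [PySem.List.mem_pyRange_one] at hi
    exact row_eq n i hi.1 hi.2 x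
  rw [h1, outer_fold (fun i => pyMulStr "  " (n - i) ++ pyMulStr "* " i ++ "\n")]
  simp
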